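-- pv_equiv track=rewrite | github.com/vjshinde04/CodeGladiators2018 | Round2/BobTheBear0.py | getCatchCount
-- ===== SOURCE A (Python) =====
-- def getCatchCount(salmons):
--     catchInstance = {}
--     instanceCount = {}
--     for key,value in salmons.items():
--         for x in value:
--             if x not in catchInstance.keys():
--                 catchInstance[x] = [key]
--             else:
--                 catchInstance[x].append(key)
--             if x not in instanceCount.keys():
--                 instanceCount[x] = 1
--             else:
--                 instanceCount[x] += 1
--     return(catchInstance,instanceCount)
-- ===== SOURCE B (Python) =====
-- def getCatchCount(salmons):
--     # Flatten to (value, key) pairs, list distinct values in first-occurrence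
--     # order, then build each group by a direct scan of the flat pair list.
--     pairs = [(x, k) for k, v in salmons.items() for x in v]
--     order = []
--     for x, _ in pairs:
--         if x not in order:
--             order.append(x)
--     groups = [[k for v, k in pairs if v == x] for x in order]
--     return (dict(zip(order, groups)), dict(zip(order, [len(g) for g in groups])))
-- ===== Notes on version B (the rewrite author's own statement) =====
-- stated objective: alternative
-- what changed: B replaces A's incremental two-dict accumulation by a staged pipeline: flatten to (value,key) pairs, extract the distinct values in first-occurrence order, then build each group (and its length) by a direct scan of the flat pair list, assembling the dicts with zip at the end.
import Mathlib
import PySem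

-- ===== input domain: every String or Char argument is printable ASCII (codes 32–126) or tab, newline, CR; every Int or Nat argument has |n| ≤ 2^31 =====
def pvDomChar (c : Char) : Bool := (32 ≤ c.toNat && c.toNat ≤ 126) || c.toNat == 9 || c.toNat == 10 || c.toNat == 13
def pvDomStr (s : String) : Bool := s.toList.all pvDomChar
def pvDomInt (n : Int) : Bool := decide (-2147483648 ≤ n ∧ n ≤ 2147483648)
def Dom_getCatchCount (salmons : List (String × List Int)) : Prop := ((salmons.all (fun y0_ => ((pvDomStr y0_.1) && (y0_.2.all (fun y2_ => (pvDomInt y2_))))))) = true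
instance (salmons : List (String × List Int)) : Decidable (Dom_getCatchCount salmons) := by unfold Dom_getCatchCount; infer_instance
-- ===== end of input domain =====

-- B replaces A's incremental two-dict accumulation by a staged pipeline: flatten to
-- (value, key) pairs, list the distinct values in first-occurrence order, then build
-- each group and its length by a direct scan of the flat pair list (objective: alternative).

-- ===== PORT A =====
-- one inner-loop body of A: both if/else updates, to catchInstance and instanceCount
def pvStepA (key : String) (st : PySem.Dict Int (List String) × PySem.Dict Int Int)
    (x : Int) : PySem.Dict Int (List String) × PySem.Dict Int Int :=
  (if st.1.contains x = false then st.1.insert x [key] else st.1.modify x [] (· ++ [key]),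
   if st.2.contains x = false then st.2.insert x 1 else st.2.modify x 0 (· + 1))

def getCatchCount (salmons : List (String × List Int)) : (List (Int × List String)) × (List (Int × Int)) :=
  let st := salmons.foldl (fun st kv => kv.2.foldl (pvStepA kv.1) st)
              (PySem.Dict.empty, PySem.Dict.empty)
  (st.1.items, st.2.items)

-- ===== PORT B =====
-- pairs = [(x, k) for k, v in salmons.items() for x in v]
def pvPairs (salmons : List (String × List Int)) : List (Int × String) :=
  salmons.flatMap (fun kv => kv.2.map (fun x => (x, kv.1)))

-- the loop body: if x not in order: order.append(x)
def pvStepO (acc : List Int) (p : Int × String) : List Int :=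
  if p.1 ∈ acc then acc else acc ++ [p.1]

-- [k for v, k in pairs if v == x]
def pvGroup (pairs : List (Int × String)) (x : Int) : List String :=
  (pairs.filter (fun p => p.1 == x)).map Prod.snd

def getCatchCount_alt (salmons : List (String × List Int)) : (List (Int × List String)) × (List (Int × Int)) :=
  let pairs := pvPairs salmons
  let order := pairs.foldl pvStepO []
  let groups := order.map (fun x => pvGroup pairs x)
  ((PySem.Dict.ofList (order.zip groups)).items,
   (PySem.Dict.ofList (order.zip (groups.map (fun g => (g.length : Int))))).items)

-- ===== PRECONDITION & SPEC =====
def Spec_getCatchCount (salmons : List (String × List Int)) (out : (List (Int × List String)) × (List (Int × Int))) : Prop := out = getCatchCount_alt salmons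
instance (salmons : List (String × List Int)) (out : (List (Int × List String)) × (List (Int × Int))) : Decidable (Spec_getCatchCount salmons out) := by unfold Spec_getCatchCount; infer_instance

-- ===== CLAIM (what is proved, stated in full; the proofs are below) =====
def Claim_equal_getCatchCount : Prop := ∀ (salmons : List (String × List Int)), Dom_getCatchCount salmons → Spec_getCatchCount salmons (getCatchCount salmons)

-- ===== LEMMAS AND PROOFS =====

-- proof-side single-dict step: catchInstance alone, as one modify
def pvStepCI (key : String) (d : PySem.Dict Int (List String)) (x : Int) : PySem.Dict Int (List String) :=
  d.modify x [] (· ++ [key])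

-- instanceCount as a function of catchInstance: same keys in the same order, each value's length
def pvLen (d : PySem.Dict Int (List String)) : PySem.Dict Int Int :=
  PySem.Dict.mk (d.items.map (fun p => (p.1, (p.2.length : Int))))

theorem pvLen_contains (d : PySem.Dict Int (List String)) (x : Int) :
    (pvLen d).contains x = d.contains x := by
  simp [pvLen, PySem.Dict.contains, List.any_map, Function.comp_def]

theorem pvLen_getD (d : PySem.Dict Int (List String)) (x : Int) :
    (pvLen d).getD x 0 = ((d.getD x []).length : Int) := by
  simp only [pvLen, PySem.Dict.getD, PySem.Dict.get?, List.find?_map]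
  cases h : List.find? (fun p => p.1 == x) d.items <;> simp [h, Function.comp_def]

theorem pvStepCI_of_not_contains (key : String) (d : PySem.Dict Int (List String)) (x : Int)
    (h : d.contains x = false) : pvStepCI key d x = d.insert x [key] := by
  simp [pvStepCI, PySem.Dict.modify, PySem.Dict.getD_of_not_contains _ _ h]

-- one inner step of A is the single-dict step on the first dict, keeping the second = pvLen of the first
theorem pvStepA_eq (key : String) (ci : PySem.Dict Int (List String)) (x : Int) :
    pvStepA key (ci, pvLen ci) x = (pvStepCI key ci x, pvLen (pvStepCI key ci x)) := by
  have hc : (pvLen ci).contains x = ci.contains x := pvLen_contains ci x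
  by_cases h : ci.contains x = false
  · rw [pvStepCI_of_not_contains key ci x h]
    unfold pvStepA
    simp only [hc, h]
    refine Prod.ext rfl ?_
    show (pvLen ci).insert x 1 = pvLen (ci.insert x [key])
    apply PySem.Dict.ext
    rw [PySem.Dict.items_insert_of_not_contains _ _ (hc.trans h)]
    show (pvLen ci).items ++ [(x, 1)]
        = ((ci.insert x [key]).items.map (fun p => (p.1, (p.2.length : Int))))
    rw [PySem.Dict.items_insert_of_not_contains _ _ h, List.map_append]
    rfl
  · rw [Bool.not_eq_false] at h
    unfold pvStepA pvStepCI
    simp only [hc, h, Bool.true_eq_false, if_false]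
    refine Prod.ext rfl ?_
    show (pvLen ci).modify x 0 (· + 1) = pvLen (ci.modify x [] (· ++ [key]))
    apply PySem.Dict.ext
    unfold PySem.Dict.modify
    rw [PySem.Dict.items_insert_of_contains _ _ (hc.trans h)]
    show ((pvLen ci).items.map (fun p => if (p.1 == x) = true then (x, (pvLen ci).getD x 0 + 1) else p))
        = ((ci.insert x (ci.getD x [] ++ [key])).items.map (fun p => (p.1, (p.2.length : Int))))
    rw [PySem.Dict.items_insert_of_contains _ _ h]
    show (ci.items.map (fun p => (p.1, (p.2.length : Int)))).map
          (fun p => if (p.1 == x) = true then (x, (pvLen ci).getD x 0 + 1) else p)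
        = (ci.items.map (fun p => if (p.1 == x) = true then (x, ci.getD x [] ++ [key]) else p)).map
          (fun p => (p.1, (p.2.length : Int)))
    rw [List.map_map, List.map_map]
    apply List.map_congr_left
    intro p _
    by_cases hp : p.1 = x
    · simp [hp, pvLen_getD]
    · simp [hp]

theorem pvInner_eq (key : String) (xs : List Int) (ci : PySem.Dict Int (List String)) :
    xs.foldl (pvStepA key) (ci, pvLen ci) = (xs.foldl (pvStepCI key) ci, pvLen (xs.foldl (pvStepCI key) ci)) := by
  induction xs generalizing ci with
  | nil => rfl
  | cons x xs ih => simp only [List.foldl_cons, pvStepA_eq]; exact ih _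

theorem pvOuter_eq (l : List (String × List Int)) (ci : PySem.Dict Int (List String)) :
    l.foldl (fun st kv => kv.2.foldl (pvStepA kv.1) st) (ci, pvLen ci)
      = (l.foldl (fun d kv => kv.2.foldl (pvStepCI kv.1) d) ci,
         pvLen (l.foldl (fun d kv => kv.2.foldl (pvStepCI kv.1) d) ci)) := by
  induction l generalizing ci with
  | nil => rfl
  | cons kv l ih => simp only [List.foldl_cons, pvInner_eq]; exact ih _

-- the double fold over salmons is a single fold over the flattened pair list
theorem pvFlatten_eq (l : List (String × List Int)) (d : PySem.Dict Int (List String)) :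
    l.foldl (fun d kv => kv.2.foldl (pvStepCI kv.1) d) d
      = (pvPairs l).foldl (fun d p => pvStepCI p.2 d p.1) d := by
  induction l generalizing d with
  | nil => rfl
  | cons kv l ih =>
    simp only [pvPairs, List.flatMap_cons, List.foldl_append, List.foldl_map, List.foldl_cons]
    rw [ih]
    rfl

-- membership in the order accumulator
theorem pvMem_foldl_stepO (pairs : List (Int × String)) (init : List Int) (x : Int) :
    x ∈ pairs.foldl pvStepO init ↔ x ∈ init ∨ ∃ p ∈ pairs, p.1 = x := by
  induction pairs generalizing init with
  | nil => simp
  | cons p pairs ih =>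
    simp only [List.foldl_cons, ih, pvStepO]
    split_ifs with h
    · constructor
      · rintro (hx | ⟨q, hq, hqx⟩)
        · exact Or.inl hx
        · exact Or.inr ⟨q, List.mem_cons_of_mem _ hq, hqx⟩
      · rintro (hx | ⟨q, hq, hqx⟩)
        · exact Or.inl hx
        · rcases List.mem_cons.mp hq with rfl | hq
          · exact Or.inl (hqx ▸ h)
          · exact Or.inr ⟨q, hq, hqx⟩
    · simp only [List.mem_append, List.mem_singleton]
      constructor
      · rintro ((hx | rfl) | ⟨q, hq, hqx⟩)
        · exact Or.inl hx
        · exact Or.inr ⟨p, List.mem_cons_self .., rfl⟩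
        · exact Or.inr ⟨q, List.mem_cons_of_mem _ hq, hqx⟩
      · rintro (hx | ⟨q, hq, hqx⟩)
        · exact Or.inl (Or.inl hx)
        · rcases List.mem_cons.mp hq with rfl | hq
          · exact Or.inl (Or.inr hqx.symm)
          · exact Or.inr ⟨q, hq, hqx⟩

theorem pvNodup_foldl_stepO (pairs : List (Int × String)) (init : List Int) (h : init.Nodup) :
    (pairs.foldl pvStepO init).Nodup := by
  induction pairs generalizing init with
  | nil => exact h
  | cons p pairs ih =>
    simp only [List.foldl_cons, pvStepO]
    split_ifs with hm
    · exact ih _ h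
    · refine ih _ ?_
      rw [List.nodup_append]
      refine ⟨h, List.nodup_singleton _, ?_⟩
      intro a ha b hb hab
      simp only [List.mem_singleton] at hb
      subst hb
      rw [hab] at ha
      exact hm ha

theorem pvGroup_append (pairs : List (Int × String)) (p : Int × String) (x : Int) :
    pvGroup (pairs ++ [p]) x = pvGroup pairs x ++ (if p.1 = x then [p.2] else []) := by
  simp only [pvGroup, List.filter_append]
  split_ifs with h <;> simp [h]

theorem pvFind_beq_self (l : List Int) (x : Int) (h : x ∈ l) :
    l.find? (fun y => y == x) = some x := by
  induction l with
  | nil => cases h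
  | cons a l ih =>
    by_cases ha : a = x
    · simp [ha]
    · rcases List.mem_cons.mp h with rfl | h
      · exact absurd rfl ha
      · simp [ha, ih h]

-- MAIN INVARIANT: the accumulated grouping dict's items are the first-occurrence
-- distinct values paired with their per-value scans of the whole pair list
theorem pvMain (pairs : List (Int × String)) :
    (pairs.foldl (fun d p => pvStepCI p.2 d p.1) PySem.Dict.empty).items
      = (pairs.foldl pvStepO []).map (fun x => (x, pvGroup pairs x)) := by
  induction pairs using List.reverseRecOn with
  | nil => rfl
  | append_singleton pairs p ih =>
    simp only [List.foldl_append, List.foldl_cons, List.foldl_nil]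
    set ci := pairs.foldl (fun d p => pvStepCI p.2 d p.1) PySem.Dict.empty with hci
    set order := pairs.foldl pvStepO [] with horder
    have hcontains : ci.contains p.1 = true ↔ p.1 ∈ order := by
      simp only [PySem.Dict.contains, ih, List.any_map, Function.comp_def, List.any_eq_true,
        beq_iff_eq]
      exact ⟨fun ⟨x, hx, e⟩ => e ▸ hx, fun h => ⟨p.1, h, rfl⟩⟩
    by_cases hmem : p.1 ∈ order
    · -- existing value: modify appends, order unchanged
      have hc : ci.contains p.1 = true := hcontains.mpr hmem
      have hstepO : pvStepO order p = order := by simp [pvStepO, hmem]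
      have hgetD : ci.getD p.1 [] = pvGroup pairs p.1 := by
        simp only [PySem.Dict.getD, PySem.Dict.get?, ih, List.find?_map, Function.comp_def]
        rw [show (fun x : Int => (x == p.1 : Bool)) = (fun y => y == p.1) from rfl,
            pvFind_beq_self order p.1 hmem]
        rfl
      show (pvStepCI p.2 ci p.1).items = (pvStepO order p).map (fun x => (x, pvGroup (pairs ++ [p]) x))
      rw [hstepO]
      unfold pvStepCI PySem.Dict.modify
      rw [PySem.Dict.items_insert_of_contains _ _ hc, ih, hgetD, List.map_map]
      apply List.map_congr_left
      intro x _
      by_cases hx : x = p.1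
      · simp [Function.comp_def, hx, pvGroup_append]
      · simp [Function.comp_def, hx, pvGroup_append, Ne.symm hx]
    · -- fresh value: insert at the end, order grows
      have hc : ci.contains p.1 = false := by
        cases hcb : ci.contains p.1
        · rfl
        · exact absurd (hcontains.mp hcb) hmem
      have hstepO : pvStepO order p = order ++ [p.1] := by simp [pvStepO, hmem]
      have hfresh : ∀ q ∈ pairs, q.1 ≠ p.1 := by
        intro q hq hqx
        exact hmem ((pvMem_foldl_stepO pairs [] p.1).mpr (Or.inr ⟨q, hq, hqx⟩))
      have hempty : pvGroup pairs p.1 = [] := by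
        simp only [pvGroup, List.map_eq_nil_iff, List.filter_eq_nil_iff]
        intro q hq
        simpa using hfresh q hq
      show (pvStepCI p.2 ci p.1).items = (pvStepO order p).map (fun x => (x, pvGroup (pairs ++ [p]) x))
      rw [hstepO, pvStepCI_of_not_contains _ _ _ hc,
          PySem.Dict.items_insert_of_not_contains _ _ hc, ih, List.map_append]
      congr 1
      · apply List.map_congr_left
        intro x hx
        have : p.1 ≠ x := fun h => hmem (h ▸ hx)
        simp [pvGroup_append, this]
      · simp [pvGroup_append, hempty]

-- dict() of a zip with fresh distinct keys keeps the list
theorem pvItems_ofList (l : List (Int × List String)) (h : (l.map Prod.fst).Nodup) :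
    (PySem.Dict.ofList l).items = l := by
  have : PySem.Dict.ofList l = l.foldl (fun d p => d.insert p.1 p.2) PySem.Dict.empty := rfl
  rw [this, PySem.Dict.items_foldl_insert_fresh _ _ _ _ (fun a _ => PySem.Dict.contains_empty _) h]
  simp [PySem.Dict.empty, PySem.Dict.items]

theorem pvItems_ofList' (l : List (Int × Int)) (h : (l.map Prod.fst).Nodup) :
    (PySem.Dict.ofList l).items = l := by
  have : PySem.Dict.ofList l = l.foldl (fun d p => d.insert p.1 p.2) PySem.Dict.empty := rfl
  rw [this, PySem.Dict.items_foldl_insert_fresh _ _ _ _ (fun a _ => PySem.Dict.contains_empty _) h]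
  simp [PySem.Dict.empty, PySem.Dict.items]

theorem pvZip_map {α β : Type} (l : List α) (f : α → β) :
    l.zip (l.map f) = l.map (fun x => (x, f x)) := by
  induction l with
  | nil => rfl
  | cons a l ih => simp [List.zip_cons_cons, ih]

-- ===== VERDICT (by name: the statement is the Claim_ definition above) =====
theorem getCatchCount_spec : Claim_equal_getCatchCount := by
  intro salmons _
  show _ = _
  simp only [getCatchCount, getCatchCount_alt]
  rw [show (PySem.Dict.empty : PySem.Dict Int Int) = pvLen PySem.Dict.empty from rfl, pvOuter_eq,
      pvFlatten_eq]
  have hnd : ((pvPairs salmons).foldl pvStepO []).Nodup := pvNodup_foldl_stepO _ _ List.nodup_nil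
  set pairs := pvPairs salmons
  set order := pairs.foldl pvStepO []
  have hitems : (pairs.foldl (fun d p => pvStepCI p.2 d p.1) PySem.Dict.empty).items
      = order.map (fun x => (x, pvGroup pairs x)) := pvMain pairs
  refine Prod.ext ?_ ?_
  · show (pairs.foldl (fun d p => pvStepCI p.2 d p.1) PySem.Dict.empty).items = _
    rw [hitems, ← pvZip_map order (fun x => pvGroup pairs x), pvItems_ofList]
    rw [pvZip_map order]
    simpa [Function.comp_def] using hnd
  · show (pvLen (pairs.foldl (fun d p => pvStepCI p.2 d p.1) PySem.Dict.empty)).items = _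
    have h2 : (pvLen (pairs.foldl (fun d p => pvStepCI p.2 d p.1) PySem.Dict.empty)).items
        = order.map (fun x => (x, ((pvGroup pairs x).length : Int))) := by
      simp [pvLen, hitems, List.map_map, Function.comp_def]
    rw [h2, List.map_map, pvZip_map order, pvItems_ofList']
    · exact (pvZip_map order _).symm
    · rw [pvZip_map order]
      simpa [Function.comp_def] using hnd
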